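-- pv_equiv track=rewrite | github.com/Ronaldo3030/trabalho_faculdade_teoria_dos_grafos | emOrdem.py | emOrdem
-- ===== SOURCE A (Python) =====
-- def emOrdem(tree, node, visited=None):
--     if visited is None:
--         visited = set()
--     if node in visited:
--         return []
--     visited.add(node)
--     result = []
--     if node in tree:
--         children = tree[node]
--         result.extend(emOrdem(tree, children[0], visited))
--         result.append(node)
--         for child in children[1:]:
--             result.extend(emOrdem(tree, child, visited))
--     else:
--         result.append(node)
--     return result
-- ===== SOURCE B (Python) =====
-- # Iterative in-order-like traversal with an explicit task stack instead of recursion.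
-- # Like A, mutates the caller's `visited` set; the equivalence claimed is about the return value.
-- def emOrdem(tree, node, visited=None):
--     if visited is None:
--         visited = set()
--     result = []
--     todo = [("visit", node)]
--     while todo:
--         kind, n = todo.pop()
--         if kind == "emit":
--             result.append(n)
--         elif n not in visited:
--             visited.add(n)
--             if n in tree:
--                 children = tree[n]
--                 todo.extend(("visit", c) for c in reversed(children[1:]))
--                 todo.append(("emit", n))
--                 todo.append(("visit", children[0]))
--             else:
--                 result.append(n)
--     return result
-- ===== Notes on version B (the rewrite author's own statement) =====
-- stated objective: alternative
-- what changed: A's recursion (emit first subtree, then the node, then the remaining subtrees, threading a visited set) is replaced by an iterative DFS loop over an explicit stack of visit/emit tasks.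
import Mathlib
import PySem

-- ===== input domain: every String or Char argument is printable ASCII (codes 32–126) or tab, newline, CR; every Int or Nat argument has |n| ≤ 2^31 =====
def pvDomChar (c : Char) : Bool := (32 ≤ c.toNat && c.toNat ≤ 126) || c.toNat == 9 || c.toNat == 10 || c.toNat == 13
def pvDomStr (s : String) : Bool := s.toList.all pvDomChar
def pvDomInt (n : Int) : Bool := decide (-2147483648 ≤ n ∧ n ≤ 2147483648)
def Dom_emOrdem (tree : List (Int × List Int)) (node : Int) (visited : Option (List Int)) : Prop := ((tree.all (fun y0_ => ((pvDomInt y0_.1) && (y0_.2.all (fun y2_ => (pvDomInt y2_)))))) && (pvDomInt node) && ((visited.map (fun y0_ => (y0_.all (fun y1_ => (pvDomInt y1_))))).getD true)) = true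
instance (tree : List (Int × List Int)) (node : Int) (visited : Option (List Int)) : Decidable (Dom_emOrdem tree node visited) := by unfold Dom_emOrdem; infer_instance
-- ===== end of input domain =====

-- B replaces A's recursion by an iterative DFS over an explicit stack of visit/emit tasks (same
-- return value; like A, the Python B mutates the caller's `visited` set — the claim is about the
-- return value only).

-- ===== PORT A =====
-- `visited=None → set()`, else the given set (Python set → PySem.Set)
def pvInitVisited (visited : Option (List Int)) : PySem.Set Int :=
  match visited with
  | none => PySem.Set.empty
  | some l => PySem.Set.ofList l

-- Recursive body of A.  Python mutates `visited` across the recursive calls, so the port threads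
-- it: the pair is (result, visited-after).  The Nat argument is a fuel bound used ONLY as a
-- totality guard (the top level passes tree.length + 1, which the proofs show is never exhausted).
mutual
  def emA (tree : List (Int × List Int)) : Nat → Int → PySem.Set Int → List Int × PySem.Set Int
    | 0, _, v => ([], v)                                   -- unreachable totality guard
    | f+1, node, v =>
      if PySem.Set.contains v node then ([], v)            -- if node in visited: return []
      else
        let v1 := PySem.Set.add v node                     -- visited.add(node)
        match (PySem.Dict.mk tree).get? node with          -- if node in tree: children = tree[node]
        | some children =>
            let p := emA tree f (children.headD 0) v1      -- children[0]; Pre_ excludes reaching an empty children list (Python: IndexError)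
            let q := emAList tree f (children.drop 1) p.2  -- for child in children[1:]
            (p.1 ++ node :: q.1, q.2)
        | none => ([node], v1)                             -- else: result.append(node)
  termination_by f _ _ => (f, 0)
  decreasing_by all_goals simp_wf <;> omega
  -- the `for child in children[1:]` loop of A
  def emAList (tree : List (Int × List Int)) : Nat → List Int → PySem.Set Int → List Int × PySem.Set Int
    | _, [], v => ([], v)
    | f, c :: cs, v =>
        let p := emA tree f c v
        let q := emAList tree f cs p.2
        (p.1 ++ q.1, q.2)
  termination_by f cs _ => (f, cs.length + 1)
  decreasing_by all_goals simp_wf <;> omega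
end

def emOrdem (tree : List (Int × List Int)) (node : Int) (visited : Option (List Int)) : List Int :=
  (emA tree (tree.length + 1) node (pvInitVisited visited)).1

-- ===== PORT B =====
-- a stack entry of B: ("visit", n) or ("emit", n)
inductive PvTask
  | visit (n : Int)
  | emit  (n : Int)
deriving DecidableEq, Repr

-- termination measure helper: number of tree keys not yet visited
def pvUnvisited (tree : List (Int × List Int)) (v : PySem.Set Int) : Nat :=
  (tree.map Prod.fst).countP (fun k => decide (k ∉ v))

theorem pvUnvisited_add_lt (tree : List (Int × List Int)) (v : PySem.Set Int) (n : Int)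
    (hk : n ∈ tree.map Prod.fst) (hv : n ∉ v) :
    pvUnvisited tree (PySem.Set.add v n) < pvUnvisited tree v := by
  unfold pvUnvisited PySem.Set.add PySem.Set.contains
  have hc : (List.contains v n) = false := by
    simpa using hv
  rw [hc]
  simp only [Bool.false_eq_true, if_false, List.countP_eq_length_filter]
  have h1 : (tree.map Prod.fst).filter (fun k => decide (k ∉ v ++ [n]))
      = ((tree.map Prod.fst).filter (fun k => decide (k ∉ v))).filter (fun k => decide (k ≠ n)) := by
    rw [List.filter_filter]
    apply List.filter_congr
    intro k _
    by_cases h1 : k ∈ v <;> by_cases h2 : k = n <;> simp [h1, h2]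
  rw [h1]
  apply List.length_filter_lt_length_iff_exists.mpr
  exact ⟨n, by simp [hv, hk], by simp⟩

theorem pvUnvisited_add_eq_of_none (tree : List (Int × List Int)) (v : PySem.Set Int) (n : Int)
    (hg : (PySem.Dict.mk tree).get? n = none) :
    pvUnvisited tree (PySem.Set.add v n) = pvUnvisited tree v := by
  have hk : n ∉ tree.map Prod.fst := by
    rw [← PySem.Dict.keys_mk]
    exact (PySem.Dict.get?_eq_none_iff_not_mem_keys _ _).mp hg
  unfold pvUnvisited PySem.Set.add
  split
  · rfl
  · apply List.countP_congr
    intro k hmem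
    have : k ≠ n := fun h => hk (h ▸ hmem)
    simp [this]

-- the `while todo:` loop of B; todo's head is the top of the stack
def emBLoop (tree : List (Int × List Int)) (todo : List PvTask) (v : PySem.Set Int)
    (result : List Int) : List Int :=
  match todo with
  | [] => result
  | PvTask.emit n :: rest => emBLoop tree rest v (result ++ [n])
  | PvTask.visit n :: rest =>
    if hc : PySem.Set.contains v n then emBLoop tree rest v result
    else
      let v1 := PySem.Set.add v n                          -- visited.add(n)
      match hg : (PySem.Dict.mk tree).get? n with
      | some children =>
          -- push: remaining children (reversed extend), then emit n, then children[0] on top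
          emBLoop tree
            (PvTask.visit (children.headD 0) :: PvTask.emit n
              :: (children.drop 1).map PvTask.visit ++ rest) v1 result
      | none => emBLoop tree rest v1 (result ++ [n])
termination_by (pvUnvisited tree v, todo.length)
decreasing_by
  · exact Prod.Lex.right _ (Nat.lt_succ_self _)
  · exact Prod.Lex.right _ (Nat.lt_succ_self _)
  · apply Prod.Lex.left
    apply pvUnvisited_add_lt
    · rw [← PySem.Dict.keys_mk (ps := tree)]
      have : (PySem.Dict.mk tree).contains n = true := by
        rw [PySem.Dict.contains_eq_isSome_get?, hg]; rfl
      rw [PySem.Dict.contains_eq_decide_mem_keys] at this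
      simpa using this
    · simpa [PySem.Set.contains] using hc
  · rw [pvUnvisited_add_eq_of_none tree v n hg]
    exact Prod.Lex.right _ (Nat.lt_succ_self _)

def emOrdem_alt (tree : List (Int × List Int)) (node : Int) (visited : Option (List Int)) : List Int :=
  emBLoop tree [PvTask.visit node] (pvInitVisited visited) []

-- ===== PRECONDITION & SPEC =====
-- one closure step of graph reachability (edges key → child, never entering `vis0`)
def pvReachStep (tree : List (Int × List Int)) (vis0 : List Int) (R : List Int) : List Int :=
  PySem.Set.update R (R.flatMap (fun u =>
    match (PySem.Dict.mk tree).get? u with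
    | some cs => if cs.isEmpty then [] else cs.filter (fun c => !(vis0.contains c))
    | none => []))

-- the nodes A's traversal can reach from `node` given the initial visited set
def pvReach (tree : List (Int × List Int)) (node : Int) (vis0 : List Int) : List Int :=
  (pvReachStep tree vis0)^[tree.length] (if vis0.contains node then [] else [node])

-- Pre_ excludes exactly the inputs on which A raises IndexError: those where the traversal
-- reaches a key whose children list is empty (then `children[0]` fails in A; B fails identically).
def Pre_emOrdem (tree : List (Int × List Int)) (node : Int) (visited : Option (List Int)) : Prop :=
  ∀ k ∈ pvReach tree node (visited.getD []), (PySem.Dict.mk tree).get? k ≠ some []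
instance (tree : List (Int × List Int)) (node : Int) (visited : Option (List Int)) : Decidable (Pre_emOrdem tree node visited) := by unfold Pre_emOrdem; infer_instance

def pvWitness_emOrdem : (List (Int × List Int)) × Int × Option (List Int) :=
  ([(1, [2, 3]), (3, [4, 1])], 1, some [4])

def Spec_emOrdem (tree : List (Int × List Int)) (node : Int) (visited : Option (List Int)) (out : List Int) : Prop := out = emOrdem_alt tree node visited
instance (tree : List (Int × List Int)) (node : Int) (visited : Option (List Int)) (out : List Int) : Decidable (Spec_emOrdem tree node visited out) := by unfold Spec_emOrdem; infer_instance

-- ===== CLAIM (what is proved, stated in full; the proofs are below) =====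
def Claim_equal_emOrdem : Prop := ∀ (tree : List (Int × List Int)) (node : Int) (visited : Option (List Int)), Dom_emOrdem tree node visited → Pre_emOrdem tree node visited → Spec_emOrdem tree node visited (emOrdem tree node visited)

-- ===== LEMMAS AND PROOFS =====

theorem emBLoop_emit (tree : List (Int × List Int)) (n : Int) (rest : List PvTask)
    (v : PySem.Set Int) (acc : List Int) :
    emBLoop tree (PvTask.emit n :: rest) v acc = emBLoop tree rest v (acc ++ [n]) := by
  rw [emBLoop]

-- A's threaded visited set only grows
theorem emA_mono (tree : List (Int × List Int)) : ∀ f : Nat,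
    (∀ (node : Int) (v : PySem.Set Int) (x : Int), x ∈ v → x ∈ (emA tree f node v).2) ∧
    (∀ (cs : List Int) (v : PySem.Set Int) (x : Int), x ∈ v → x ∈ (emAList tree f cs v).2) := by
  intro f
  induction f with
  | zero =>
    have hA : ∀ (node : Int) (v : PySem.Set Int) (x : Int), x ∈ v → x ∈ (emA tree 0 node v).2 := by
      intro node v x hx; rw [emA]; exact hx
    refine ⟨hA, ?_⟩
    intro cs
    induction cs with
    | nil => intro v x hx; rw [emAList]; exact hx
    | cons c cs ihc => intro v x hx; rw [emAList]; exact ihc _ _ (hA _ _ _ hx)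
  | succ f ih =>
    have hadd : ∀ (v : PySem.Set Int) (n x : Int), x ∈ v → x ∈ PySem.Set.add v n := by
      intro v n x hx
      unfold PySem.Set.add
      split
      · exact hx
      · exact List.mem_append_left _ hx
    have hA : ∀ (node : Int) (v : PySem.Set Int) (x : Int), x ∈ v → x ∈ (emA tree (f+1) node v).2 := by
      intro node v x hx
      rw [emA]
      split
      · exact hx
      · split
        · exact ih.2 _ _ _ (ih.1 _ _ _ (hadd _ _ _ hx))
        · exact hadd _ _ _ hx
    refine ⟨hA, ?_⟩
    intro cs
    induction cs with
    | nil => intro v x hx; rw [emAList]; exact hx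
    | cons c cs ihc => intro v x hx; rw [emAList]; exact ihc _ _ (hA _ _ _ hx)

theorem pvUnvisited_mono (tree : List (Int × List Int)) (v w : PySem.Set Int)
    (h : ∀ x, x ∈ v → x ∈ w) : pvUnvisited tree w ≤ pvUnvisited tree v := by
  unfold pvUnvisited
  apply List.countP_mono_left
  intro k _ hk
  simp only [decide_eq_true_eq] at *
  exact fun hv => hk (h k hv)

-- the stack machine simulates A: consuming a `visit` task produces exactly A's recursive result,
-- and a block of `visit` tasks produces exactly A's children loop
theorem emB_bridge (tree : List (Int × List Int)) : ∀ f : Nat,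
    (∀ (node : Int) (v : PySem.Set Int) (rest : List PvTask) (acc : List Int),
      pvUnvisited tree v < f →
      emBLoop tree (PvTask.visit node :: rest) v acc
        = emBLoop tree rest (emA tree f node v).2 (acc ++ (emA tree f node v).1)) ∧
    (∀ (cs : List Int) (v : PySem.Set Int) (rest : List PvTask) (acc : List Int),
      pvUnvisited tree v < f →
      emBLoop tree (cs.map PvTask.visit ++ rest) v acc
        = emBLoop tree rest (emAList tree f cs v).2 (acc ++ (emAList tree f cs v).1)) := by
  intro f
  induction f with
  | zero => exact ⟨fun _ _ _ _ h => absurd h (by omega), fun _ _ _ _ h => absurd h (by omega)⟩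
  | succ f ih =>
    have hA : ∀ (node : Int) (v : PySem.Set Int) (rest : List PvTask) (acc : List Int),
        pvUnvisited tree v < f + 1 →
        emBLoop tree (PvTask.visit node :: rest) v acc
          = emBLoop tree rest (emA tree (f+1) node v).2 (acc ++ (emA tree (f+1) node v).1) := by
      intro node v rest acc hlt
      rw [emBLoop, emA]
      by_cases hm : node ∈ v
      · simp [hm, PySem.Set.contains]
      · simp only [hm, PySem.Set.contains, List.contains_iff_mem, dite_false, if_false,
          Bool.false_eq_true, decide_eq_true_eq]
        cases hg : (PySem.Dict.mk tree).get? node with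
        | none => simp [hg]
        | some children =>
          simp only [hg]
          have hkey : node ∈ tree.map Prod.fst := by
            rw [← PySem.Dict.keys_mk (ps := tree)]
            have hct : (PySem.Dict.mk tree).contains node = true := by
              rw [PySem.Dict.contains_eq_isSome_get?, hg]; rfl
            rw [PySem.Dict.contains_eq_decide_mem_keys] at hct
            simpa using hct
          have h1 : pvUnvisited tree (PySem.Set.add v node) < f := by
            have := pvUnvisited_add_lt tree v node hkey hm
            omega
          have e1 := ih.1 (children.headD 0) (PySem.Set.add v node)
            (PvTask.emit node :: List.map PvTask.visit (List.drop 1 children) ++ rest) acc h1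
          refine e1.trans ((emBLoop_emit tree node _ _ _).trans ?_)
          have h2 : pvUnvisited tree (emA tree f (children.headD 0) (PySem.Set.add v node)).2 < f := by
            have hmo := pvUnvisited_mono tree (PySem.Set.add v node) _
              (fun x hx => (emA_mono tree f).1 (children.headD 0) _ x hx)
            omega
          have e2 := ih.2 (List.drop 1 children) (emA tree f (children.headD 0) (PySem.Set.add v node)).2
            rest (acc ++ (emA tree f (children.headD 0) (PySem.Set.add v node)).1 ++ [node]) h2
          refine e2.trans ?_
          simp
    refine ⟨hA, ?_⟩
    intro cs
    induction cs with
    | nil => intro v rest acc _; rw [emAList]; simp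
    | cons c cs ihc =>
      intro v rest acc hlt
      rw [emAList]
      simp only [List.map_cons, List.cons_append]
      rw [hA c v _ acc hlt]
      have h2 : pvUnvisited tree (emA tree (f+1) c v).2 < f + 1 := by
        have hm := pvUnvisited_mono tree v _ (fun x hx => (emA_mono tree (f+1)).1 c v x hx)
        omega
      rw [ihc _ rest _ h2]
      simp

-- ===== VERDICT (by name: the statement is the Claim_ definition above) =====
theorem emOrdem_spec : Claim_equal_emOrdem := by
  intro tree node visited _ _
  unfold Spec_emOrdem emOrdem emOrdem_alt
  have hlt : pvUnvisited tree (pvInitVisited visited) < tree.length + 1 := by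
    have : pvUnvisited tree (pvInitVisited visited) ≤ (tree.map Prod.fst).length :=
      List.countP_le_length
    simpa using Nat.lt_succ_of_le (by simpa using this)
  rw [(emB_bridge tree (tree.length + 1)).1 node _ [] [] hlt]
  rw [emBLoop]
  simp
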